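-- pv_equiv track=rewrite | github.com/jso122-2/DAWN_pub_real | owl/lineage_tracker.py | trace_lineages
-- ===== SOURCE A (Python) =====
-- def trace_lineages(flowers, graph, roots):
--     lineages = []
--
--     def dfs(path):
--         current = path[-1]
--         if current not in graph:
--             lineages.append(list(path))
--             return
--         for child in graph[current]:
--             dfs(path + [child])
--
--     for root in roots:
--         dfs([root])
--
--     return lineages
-- ===== SOURCE B (Python) =====
-- def trace_lineages(flowers, graph, roots):
--     # Iterative DFS with an explicit stack of partial paths instead of recursion.
--     lineages = []
--     stack = [[root] for root in reversed(roots)]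
--     while stack:
--         path = stack.pop()
--         current = path[-1]
--         if current not in graph:
--             lineages.append(path)
--         else:
--             for child in reversed(graph[current]):
--                 stack.append(path + [child])
--     return lineages
-- ===== Notes on version B (the rewrite author's own statement) =====
-- stated objective: alternative
-- what changed: Replaces the recursive accumulator-mutating DFS with an iterative explicit-stack traversal over partial paths (roots and children pushed in reverse so pops reproduce the left-to-right DFS order).
import Mathlib
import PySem

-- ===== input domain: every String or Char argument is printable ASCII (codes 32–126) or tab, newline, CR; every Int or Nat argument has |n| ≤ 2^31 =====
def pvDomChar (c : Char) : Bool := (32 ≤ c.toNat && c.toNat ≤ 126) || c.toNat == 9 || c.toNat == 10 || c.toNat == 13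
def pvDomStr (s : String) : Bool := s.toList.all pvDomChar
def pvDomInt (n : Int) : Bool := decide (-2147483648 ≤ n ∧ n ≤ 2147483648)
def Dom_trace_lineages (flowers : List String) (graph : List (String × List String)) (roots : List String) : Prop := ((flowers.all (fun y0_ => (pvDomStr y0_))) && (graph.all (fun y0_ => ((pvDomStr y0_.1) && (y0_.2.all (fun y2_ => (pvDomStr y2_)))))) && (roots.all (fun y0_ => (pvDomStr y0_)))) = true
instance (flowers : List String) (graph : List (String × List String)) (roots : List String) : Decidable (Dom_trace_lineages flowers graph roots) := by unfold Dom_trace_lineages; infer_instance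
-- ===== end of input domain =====

-- B replaces A's recursive accumulator-mutating DFS with an iterative explicit-stack
-- traversal over partial paths; same cost, different decomposition.


-- ===== PORT A =====
-- A's inner 'dfs(path)': fuel is only a totalization guard; on Pre_ inputs every
-- path has ≤ (number of graph keys)+1 nodes, so fuel (graph.length+1) never runs out.
def pvDfsA (g : PySem.Dict String (List String)) : Nat → List String → List (List String) → List (List String)
  | 0, _, lineages => lineages
  | fuel + 1, path, lineages =>
    match PySem.List.pyGet? path (-1) with
    | none => lineages  -- unreachable: path is always nonempty
    | some current =>
      if g.contains current = false then
        lineages ++ [path]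
      else
        (g.getD current []).foldl (fun acc child => pvDfsA g fuel (path ++ [child]) acc) lineages

def trace_lineages (flowers : List String) (graph : List (String × List String)) (roots : List String) : List (List String) :=
  let g := PySem.Dict.ofList graph
  roots.foldl (fun lineages root => pvDfsA g (graph.length + 1) [root] lineages) []

-- ===== PORT B =====
-- Width bound used only by pvLoopB's termination measure: strictly more than the
-- length of any child list stored in g.
def pvWg (g : PySem.Dict String (List String)) : Nat :=
  ((g.values.map List.length).foldl max 0) + 2

-- termination helper, cited by pvLoopB's decreasing_by
theorem pv_getD_len_lt (g : PySem.Dict String (List String)) (k : String) :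
    (g.getD k []).length < pvWg g := by
  unfold pvWg
  cases h : g.get? k with
  | none => simp [PySem.Dict.getD, h]
  | some v =>
    have hv : v ∈ g.values := by
      simp only [PySem.Dict.get?, Option.map_eq_some_iff] at h
      obtain ⟨p, hp, rfl⟩ := h
      exact List.mem_map_of_mem (List.mem_of_find?_eq_some hp)
    have := (PySem.List.le_foldl_max (g.values.map List.length) 0).2 v.length
      (List.mem_map_of_mem hv)
    simp only [PySem.Dict.getD, h, Option.getD_some]
    omega

-- B's while-loop: Lean's list head is the top of the Python stack, so Python's
-- reversed pushes appear here as in-order prepends.  The Nat on each stack entry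
-- is a totalization fuel bounding the entry's remaining expansion depth; it is
-- graph.length+1 at the roots and never runs out on Pre_ inputs.
def pvLoopB (g : PySem.Dict String (List String)) :
    List (List String × Nat) → List (List String) → List (List String)
  | [], lineages => lineages
  | (_, 0) :: rest, lineages => pvLoopB g rest lineages  -- fuel guard, unreachable on Pre_
  | (path, f + 1) :: rest, lineages =>
    match PySem.List.pyGet? path (-1) with
    | none => pvLoopB g rest lineages  -- unreachable: every stacked path is nonempty
    | some current =>
      if g.contains current = false then
        pvLoopB g rest (lineages ++ [path])
      else
        pvLoopB g ((g.getD current []).map (fun child => (path ++ [child], f)) ++ rest) lineages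
  termination_by stack _ => (stack.map (fun e => pvWg g ^ e.2)).sum
  decreasing_by
  · simp
  · have h0 : 0 < pvWg g ^ (f + 1) := Nat.pow_pos (a := pvWg g) (by unfold pvWg; omega)
    simp
    omega
  · have h0 : 0 < pvWg g ^ (f + 1) := Nat.pow_pos (a := pvWg g) (by unfold pvWg; omega)
    simp
    omega
  · have hlen := pv_getD_len_lt g current
    have hpow : 0 < pvWg g ^ f := Nat.pow_pos (a := pvWg g) (by unfold pvWg; omega)
    simp only [List.map_append, List.sum_append, List.map_map, Function.comp_def,
      List.map_cons, List.sum_cons]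
    have h1 : ((g.getD current []).map (fun c => pvWg g ^ f)).sum
        = (g.getD current []).length * pvWg g ^ f := by
      induction (g.getD current []) with
      | nil => simp
      | cons x xs ihx => simp; ring
    rw [h1]
    have h2 : (g.getD current []).length * pvWg g ^ f < pvWg g * pvWg g ^ f :=
      Nat.mul_lt_mul_of_lt_of_le hlen (Nat.le_refl _) hpow
    have h3 : pvWg g * pvWg g ^ f = pvWg g ^ (f + 1) := by rw [pow_succ]; ring
    simp only [Nat.succ_eq_add_one]
    omega
def trace_lineages_alt (flowers : List String) (graph : List (String × List String)) (roots : List String) : List (List String) :=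
  let g := PySem.Dict.ofList graph
  pvLoopB g (roots.map (fun root => ([root], graph.length + 1))) []

-- ===== PRECONDITION & SPEC =====
def pvChildren (graph : List (String × List String)) (n : String) : List String :=
  (PySem.Dict.ofList graph).getD n []

def pvExpand (graph : List (String × List String)) (s : List String) : List String :=
  PySem.Set.update s (s.flatMap (pvChildren graph))

def pvReach (graph : List (String × List String)) : Nat → List String → List String
  | 0, s => s
  | n + 1, s => pvReach graph n (pvExpand graph s)

-- Pre_ excludes exactly the inputs on which Python A recurses without bound
-- (RecursionError): some node reachable from the roots lies on a cycle of the graph.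
def Pre_trace_lineages (flowers : List String) (graph : List (String × List String)) (roots : List String) : Prop :=
  ∀ k ∈ pvReach graph (graph.length + 1) (PySem.Set.ofList roots),
    k ∉ pvReach graph (graph.length + 1) (PySem.Set.ofList (pvChildren graph k))
instance (flowers : List String) (graph : List (String × List String)) (roots : List String) : Decidable (Pre_trace_lineages flowers graph roots) := by unfold Pre_trace_lineages; infer_instance

def pvWitness_trace_lineages : List String × (List (String × List String)) × List String :=
  (["f"], [("a", ["b", "c"]), ("b", ["d"])], ["a", "x"])

def Spec_trace_lineages (flowers : List String) (graph : List (String × List String)) (roots : List String) (out : List (List String)) : Prop := out = trace_lineages_alt flowers graph roots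
instance (flowers : List String) (graph : List (String × List String)) (roots : List String) (out : List (List String)) : Decidable (Spec_trace_lineages flowers graph roots out) := by unfold Spec_trace_lineages; infer_instance

-- ===== CLAIM (what is proved, stated in full; the proofs are below) =====
def Claim_equal_trace_lineages : Prop := ∀ (flowers : List String) (graph : List (String × List String)) (roots : List String), Dom_trace_lineages flowers graph roots → Pre_trace_lineages flowers graph roots → Spec_trace_lineages flowers graph roots (trace_lineages flowers graph roots)

-- ===== LEMMAS AND PROOFS =====

-- Proof-only specification: the list of leaf paths hanging below 'node', at a given
-- depth fuel; both ports are related to it fuel-for-fuel, so no sufficiency argument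
-- about the fuel is ever needed.
def pvPathsB (g : PySem.Dict String (List String)) : Nat → String → List (List String)
  | 0, _ => []
  | fuel + 1, node =>
    if g.contains node = false then
      [[node]]
    else
      (g.getD node []).flatMap (fun child => (pvPathsB g fuel child).map (fun tail => node :: tail))

-- A's dfs on path (pre ++ [cur]) appends exactly the suffix-paths of cur, each
-- prefixed with pre; holds for EVERY fuel value, since both run out in lock-step.
theorem pvDfsA_eq_pathsB (g : PySem.Dict String (List String)) :
    ∀ (fuel : Nat) (pre : List String) (cur : String) (acc : List (List String)),
      pvDfsA g fuel (pre ++ [cur]) acc = acc ++ (pvPathsB g fuel cur).map (pre ++ ·) := by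
  intro fuel
  induction fuel with
  | zero => intro pre cur acc; simp [pvDfsA, pvPathsB]
  | succ f ih =>
    intro pre cur acc
    rw [pvDfsA, PySem.List.pyGet?_neg_one_append_singleton]
    by_cases h : g.contains cur = false
    · simp [pvPathsB, h]
    · have h' : g.contains cur = true := by revert h; cases g.contains cur <;> simp
      simp only [h']
      rw [if_neg (by simp)]
      have hbody : ∀ (a : List (List String)) (c : String), c ∈ g.getD cur [] →
          (fun acc child => pvDfsA g f (pre ++ [cur] ++ [child]) acc) a c
            = (fun acc child => acc ++ (pvPathsB g f child).map ((pre ++ [cur]) ++ ·)) a c := by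
        intro a c _
        simpa [List.append_assoc] using ih (pre ++ [cur]) c a
      rw [PySem.List.foldl_congr_mem (g.getD cur []) _ _ acc hbody]
      simp only [PySem.List.foldl_append_eq_flatMap]
      rw [pvPathsB]
      simp only [h']
      rw [if_neg (by simp)]
      simp only [List.map_flatMap, List.map_map]
      congr 1
      apply List.flatMap_congr
      intro c _
      simp [Function.comp, List.append_assoc]

-- B's stack loop: processing the topmost entry (pre ++ [cur], f) emits exactly the
-- suffix-paths of cur prefixed with pre, then continues with the rest of the stack;
-- again fuel-for-fuel with pvPathsB, for EVERY fuel.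
theorem pvLoopB_cons (g : PySem.Dict String (List String)) :
    ∀ (f : Nat) (pre : List String) (cur : String)
      (rest : List (List String × Nat)) (out : List (List String)),
      pvLoopB g ((pre ++ [cur], f) :: rest) out
        = pvLoopB g rest (out ++ (pvPathsB g f cur).map (pre ++ ·)) := by
  intro f
  induction f with
  | zero => intro pre cur rest out; simp [pvLoopB, pvPathsB]
  | succ f ih =>
    intro pre cur rest out
    rw [pvLoopB, PySem.List.pyGet?_neg_one_append_singleton]
    by_cases h : g.contains cur = false
    · simp [pvPathsB, h]
    · have h' : g.contains cur = true := by revert h; cases g.contains cur <;> simp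
      simp only [h']
      rw [if_neg (by simp)]
      have aux : ∀ (cs : List String) (rest : List (List String × Nat)) (out : List (List String)),
          pvLoopB g (cs.map (fun child => (pre ++ [cur] ++ [child], f)) ++ rest) out
            = pvLoopB g rest
                (out ++ cs.flatMap (fun c => (pvPathsB g f c).map ((pre ++ [cur]) ++ ·))) := by
        intro cs
        induction cs with
        | nil => intro rest out; simp
        | cons c cs ihc =>
          intro rest out
          simp only [List.map_cons, List.cons_append]
          rw [ih (pre ++ [cur]) c, ihc]
          simp [List.append_assoc]
      rw [aux]
      rw [pvPathsB]
      simp only [h']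
      rw [if_neg (by simp)]
      simp only [List.map_flatMap, List.map_map]
      congr 2
      apply List.flatMap_congr
      intro c _
      simp [Function.comp, List.append_assoc]

-- Folding A's dfs over the roots equals running B's loop on the root stack.
theorem foldl_dfs_eq_loop (g : PySem.Dict String (List String)) (F : Nat) :
    ∀ (rs : List String) (out : List (List String)),
      rs.foldl (fun lineages root => pvDfsA g F [root] lineages) out
        = pvLoopB g (rs.map (fun root => ([root], F))) out := by
  intro rs
  induction rs with
  | nil => intro out; simp [pvLoopB]
  | cons r rs ih =>
    intro out
    simp only [List.foldl_cons, List.map_cons]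
    have h1 : pvDfsA g F [r] out = out ++ (pvPathsB g F r).map ([] ++ ·) := by
      simpa using pvDfsA_eq_pathsB g F [] r out
    have h2 : pvLoopB g (([r], F) :: rs.map (fun root => ([root], F))) out
        = pvLoopB g (rs.map (fun root => ([root], F))) (out ++ (pvPathsB g F r).map ([] ++ ·)) := by
      simpa using pvLoopB_cons g F [] r (rs.map (fun root => ([root], F))) out
    rw [h2, ← h1, ih]

-- ===== VERDICT (by name: the statement is the Claim_ definition above) =====
theorem trace_lineages_spec : Claim_equal_trace_lineages := by
  intro flowers graph roots _ _
  unfold Spec_trace_lineages trace_lineages trace_lineages_alt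
  exact foldl_dfs_eq_loop (PySem.Dict.ofList graph) (graph.length + 1) roots []
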